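-- pv_equiv track=rewrite | github.com/doocs/leetcode | solution/3500-3599/3581.Count Odd Letters from Number/Solution.py | countOddLetters
-- ===== SOURCE A (Python) =====
-- d = {
--     0: "zero",
--     1: "one",
--     2: "two",
--     3: "three",
--     4: "four",
--     5: "five",
--     6: "six",
--     7: "seven",
--     8: "eight",
--     9: "nine",
-- }
--
-- def countOddLetters(n: int) -> int:
--     mask = 0
--     while n:
--         x = n % 10
--         n //= 10
--         for c in d[x]:
--             mask ^= 1 << (ord(c) - ord("a"))
--     return mask.bit_count()
-- ===== SOURCE B (Python) =====
-- SPELL = ["zero", "one", "two", "three", "four", "five", "six", "seven", "eight", "nine"]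
--
-- def countOddLetters(n: int) -> int:
--     # Phase 1: histogram of digits (no letters touched yet).
--     cnt = [0] * 10
--     while n:
--         cnt[n % 10] += 1
--         n //= 10
--     # Phase 2: for each letter of the alphabet, its total number of
--     # occurrences is a linear combination of the digit counts.
--     ans = 0
--     for i in range(26):
--         c = chr(ord("a") + i)
--         total = 0
--         for x in range(10):
--             total += cnt[x] * SPELL[x].count(c)
--         ans += total % 2
--     return ans
-- ===== Notes on version B (the rewrite author's own statement) =====
-- stated objective: alternative
-- what changed: B never iterates over letters while extracting digits: it first builds a histogram of the digits, then for each letter of the alphabet computes its total frequency as the linear combination sum(cnt[x]*SPELL[x].count(letter)) over the digit counts and counts the odd totals, replacing A's per-letter XOR bitmask and bit_count.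
import Mathlib
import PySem

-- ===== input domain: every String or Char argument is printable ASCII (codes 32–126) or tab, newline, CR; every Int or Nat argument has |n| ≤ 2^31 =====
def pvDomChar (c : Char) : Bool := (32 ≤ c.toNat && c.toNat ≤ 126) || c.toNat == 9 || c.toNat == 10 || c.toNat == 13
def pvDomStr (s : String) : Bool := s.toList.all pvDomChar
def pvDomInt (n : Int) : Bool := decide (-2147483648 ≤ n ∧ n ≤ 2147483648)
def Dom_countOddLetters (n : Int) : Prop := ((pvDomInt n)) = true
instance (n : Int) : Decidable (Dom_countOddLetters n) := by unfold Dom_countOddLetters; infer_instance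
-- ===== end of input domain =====

-- B builds a digit histogram first and then derives each letter's total count as a linear
-- combination of the digit counts, instead of A's per-letter XOR bitmask + bit_count
-- (objective: alternative, no speed claim).

-- ===== PORT A =====
-- the module-level dict d
def pvD : PySem.Dict Int String :=
  PySem.Dict.ofList
  [(0, "zero"), (1, "one"), (2, "two"), (3, "three"), (4, "four"),
   (5, "five"), (6, "six"), (7, "seven"), (8, "eight"), (9, "nine")]

-- d[x] as a char list; x is always 0..9 here, so Python's KeyError is unreachable
def pvSpell (x : Int) : List Char := (PySem.Dict.getD pvD x "").toList

-- mask ^= 1 << (ord(c) - ord("a")); every iterated c is a lowercase letter, so ord(c) - 97 ≥ 0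
def pvMaskStep (mask : Int) (c : Char) : Int := PySem.Int.bxor mask ((1 : Int) <<< (c.toNat - 97))

-- the 'while n:' loop; it runs on the Nat value of n (for n < 0 the Python loop never
-- terminates, so no return value is at stake there; both ports stop at n.toNat = 0)
def pvLoopA (m : Nat) (mask : Int) : Int :=
  if h : m = 0 then mask
  else pvLoopA (m / 10) ((pvSpell (Int.ofNat (m % 10))).foldl pvMaskStep mask)
  termination_by m
  decreasing_by exact Nat.div_lt_self (Nat.pos_of_ne_zero h) (by norm_num)

def countOddLetters (n : Int) : Int := ((PySem.Int.bitCount (pvLoopA n.toNat 0) : Nat) : Int)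

-- ===== PORT B =====
-- the module-level list SPELL
def pvSPELL : List String :=
  ["zero", "one", "two", "three", "four", "five", "six", "seven", "eight", "nine"]

-- phase-1 loop: cnt[n % 10] += 1; n //= 10  (same n.toNat convention as port A)
def pvCntLoop (m : Nat) (cnt : List Int) : List Int :=
  if h : m = 0 then cnt
  else pvCntLoop (m / 10) (cnt.set (m % 10) (cnt.getD (m % 10) 0 + 1))
  termination_by m
  decreasing_by exact Nat.div_lt_self (Nat.pos_of_ne_zero h) (by norm_num)

-- phase 2: for each letter i, total = Σ_x cnt[x] * SPELL[x].count(chr(97+i)); ans += total % 2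
def countOddLetters_alt (n : Int) : Int :=
  let cnt := pvCntLoop n.toNat (List.replicate 10 0)
  (List.range 26).foldl
    (fun ans i =>
      let c : Char := Char.ofNat (97 + i)
      let total := (List.range 10).foldl
        (fun s x => s + cnt.getD x 0 * (PySem.Str.count (pvSPELL.getD x "") (String.ofList [c]) : Int)) 0
      ans + PySem.Int.mod total 2) 0

-- ===== PRECONDITION & SPEC =====
def Spec_countOddLetters (n : Int) (out : Int) : Prop := out = countOddLetters_alt n
instance (n : Int) (out : Int) : Decidable (Spec_countOddLetters n out) := by unfold Spec_countOddLetters; infer_instance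

-- ===== CLAIM =====
def Claim_equal_countOddLetters : Prop := ∀ (n : Int), Dom_countOddLetters n → Spec_countOddLetters n (countOddLetters n)

-- ===== LEMMAS AND PROOFS =====

-- the digit sequence both loops consume (least significant first)
def pvDigits (m : Nat) : List Nat :=
  if h : m = 0 then []
  else m % 10 :: pvDigits (m / 10)
  termination_by m
  decreasing_by exact Nat.div_lt_self (Nat.pos_of_ne_zero h) (by norm_num)

lemma pvDigits_lt (m : Nat) : ∀ d ∈ pvDigits m, d < 10 := by
  induction m using Nat.strong_induction_on with
  | _ m ih =>
    intro d hd
    rw [pvDigits] at hd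
    by_cases h : m = 0
    · simp [h] at hd
    · simp only [h, dif_neg, not_false_iff, List.mem_cons] at hd
      rcases hd with rfl | hd
      · exact Nat.mod_lt _ (by norm_num)
      · exact ih (m / 10) (Nat.div_lt_self (Nat.pos_of_ne_zero h) (by norm_num)) d hd

-- the concatenation of the digit spellings A's loop traverses
def pvLetters (m : Nat) : List Char := (pvDigits m).flatMap (fun d => pvSpell (Int.ofNat d))

lemma pvLoopA_eq (m : Nat) : ∀ mask, pvLoopA m mask = (pvLetters m).foldl pvMaskStep mask := by
  induction m using Nat.strong_induction_on with
  | _ m ih =>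
    intro mask
    rw [pvLoopA, pvLetters, pvDigits]
    by_cases h : m = 0
    · simp [h]
    · simp only [h, dif_neg, not_false_iff, List.flatMap_cons]
      rw [List.foldl_append, ih (m / 10) (Nat.div_lt_self (Nat.pos_of_ne_zero h) (by norm_num))]
      rfl

lemma pvCntLoop_eq (m : Nat) : ∀ cnt, pvCntLoop m cnt
    = (pvDigits m).foldl (fun c d => c.set d (c.getD d 0 + 1)) cnt := by
  induction m using Nat.strong_induction_on with
  | _ m ih =>
    intro cnt
    rw [pvCntLoop, pvDigits]
    by_cases h : m = 0
    · simp [h]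
    · simp only [h, dif_neg, not_false_iff, List.foldl_cons]
      exact ih (m / 10) (Nat.div_lt_self (Nat.pos_of_ne_zero h) (by norm_num)) _

-- the histogram invariant of B's phase-1 loop
lemma pvCnt_getD (ds : List Nat) (hds : ∀ d ∈ ds, d < 10) :
    ∀ (cnt : List Int), cnt.length = 10 → ∀ x < 10,
      (ds.foldl (fun c d => c.set d (c.getD d 0 + 1)) cnt).getD x 0
        = cnt.getD x 0 + (ds.count x : Int) := by
  induction ds with
  | nil => intro cnt _ x _; simp
  | cons d t ih =>
    intro cnt hlen x hx
    have hd : d < 10 := hds d (by simp)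
    have hset : (cnt.set d (cnt.getD d 0 + 1)).length = 10 := by simp [hlen]
    rw [List.foldl_cons, ih (fun d' hd' => hds d' (by simp [hd'])) _ hset x hx,
      List.count_cons]
    have hget : (cnt.set d (cnt.getD d 0 + 1)).getD x 0
        = if x = d then cnt.getD d 0 + 1 else cnt.getD x 0 := by
      by_cases hxd : x = d
      · subst hxd
        simp [List.getD_eq_getElem?_getD, List.getElem?_set_self (by omega : x < cnt.length)]
      · simp [hxd, List.getD_eq_getElem?_getD, List.getElem?_set_ne (fun h => hxd h.symm)]
    rw [hget]
    by_cases hxd : x = d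
    · subst hxd; simp; ring
    · simp [hxd, Ne.symm hxd]

-- every letter of a digit spelling is a lowercase a..z
lemma pvSpell_chars (x : Nat) (h : x < 10) :
    ∀ c ∈ pvSpell (Int.ofNat x), 97 ≤ c.toNat ∧ c.toNat ≤ 122 := by
  have hall : ((pvSpell (Int.ofNat x)).all (fun c => 97 ≤ c.toNat && c.toNat ≤ 122)) = true := by
    interval_cases x <;> decide
  intro c hc
  simpa using List.all_eq_true.mp hall c hc

lemma pvLetters_chars (m : Nat) : ∀ c ∈ pvLetters m, 97 ≤ c.toNat ∧ c.toNat ≤ 122 := by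
  intro c hc
  rw [pvLetters, List.mem_flatMap] at hc
  obtain ⟨d, hd, hc⟩ := hc
  exact pvSpell_chars d (pvDigits_lt m d hd) c hc

-- A's Int mask fold is the Nat XOR fold
def pvXor (m : Nat) (c : Char) : Nat := m ^^^ (1 <<< (c.toNat - 97))

lemma pvFold_natCast (L : List Char) : ∀ (m : Nat),
    L.foldl pvMaskStep ((m : Nat) : Int) = ((L.foldl pvXor m : Nat) : Int) := by
  induction L with
  | nil => intro m; rfl
  | cons c L ih =>
    intro m
    have h1 : ((1 : Int) <<< (c.toNat - 97)) = (((1 <<< (c.toNat - 97) : Nat) : Nat) : Int) := by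
      simp [Int.shiftLeft_eq, Nat.shiftLeft_eq]
    have : pvMaskStep ((m : Nat) : Int) c = ((pvXor m c : Nat) : Int) := by
      rw [pvMaskStep, pvXor, h1, PySem.Int.bxor_natCast]
    simp only [List.foldl_cons, this, ih]

lemma pvFold_testBit (L : List Char) : ∀ (m i : Nat),
    (L.foldl pvXor m).testBit i
      = ((m.testBit i) ^^ decide ((L.countP (fun c => decide (c.toNat - 97 = i))) % 2 = 1)) := by
  induction L with
  | nil => intro m i; simp
  | cons c L ih =>
    intro m i
    simp only [List.foldl_cons, ih, List.countP_cons]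
    have hstep : (pvXor m c).testBit i = ((m.testBit i) ^^ decide (c.toNat - 97 = i)) := by
      rw [pvXor, Nat.testBit_xor, Nat.shiftLeft_eq, one_mul, Nat.testBit_two_pow]
    rw [hstep]
    by_cases h : c.toNat - 97 = i
    · simp only [h, decide_true, if_pos]
      cases hb : m.testBit i <;>
        cases hp : decide ((L.countP (fun c => decide (c.toNat - 97 = i))) % 2 = 1) <;>
          simp_all <;> omega
    · simp only [h, decide_false]
      cases hb : m.testBit i <;> simp

lemma pvFold_lt (L : List Char) (hL : ∀ c ∈ L, 97 ≤ c.toNat ∧ c.toNat ≤ 122) :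
    ∀ m, m < 2 ^ 26 → L.foldl pvXor m < 2 ^ 26 := by
  induction L with
  | nil => intro m hm; simpa using hm
  | cons c L ih =>
    intro m hm
    have hc := hL c (by simp)
    have h1 : (1 <<< (c.toNat - 97) : Nat) < 2 ^ 26 := by
      rw [Nat.shiftLeft_eq, one_mul]
      exact Nat.pow_lt_pow_right (by norm_num) (by omega)
    exact ih (fun c' hc' => hL c' (by simp [hc'])) _ (Nat.xor_lt_two_pow hm h1)

lemma pvBitCount_eq_countP : ∀ (k m : Nat), m < 2 ^ k →
    PySem.Int.bitCount ((m : Nat) : Int) = (List.range k).countP (fun i => m.testBit i) := by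
  intro k
  induction k with
  | zero =>
    intro m hm
    interval_cases m
    simp
  | succ k ih =>
    intro m hm
    by_cases h0 : m = 0
    · subst h0; simp
    · rw [PySem.Int.bitCount_natCast (Nat.pos_of_ne_zero h0),
        ih (m / 2) (by omega),
        List.range_succ_eq_map, List.countP_cons, List.countP_map]
      have h0t : m.testBit 0 = decide (m % 2 = 1) := by
        simp [Nat.testBit_zero]
      have hcong : (List.range k).countP ((fun i => m.testBit i) ∘ Nat.succ)
          = (List.range k).countP (fun i => (m / 2).testBit i) := by
        refine List.countP_congr ?_
        intro i _
        simp [Function.comp, Nat.testBit_succ]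
      rw [hcong, h0t]
      by_cases hpar : m % 2 = 1 <;> simp [hpar] <;> omega

-- B's concrete coefficient table agrees with A's per-letter predicate on each digit spelling
lemma pvCoeff_eq : ∀ x < 10, ∀ i < 26,
    PySem.Str.count (pvSPELL.getD x "") (String.ofList [Char.ofNat (97 + i)])
      = (pvSpell (Int.ofNat x)).countP (fun c => decide (c.toNat - 97 = i)) := by
  decide

-- countP of a flatMap is the sum of the per-block countPs
lemma pvCountP_flatMap (ds : List Nat) (p : Char → Bool) (f : Nat → List Char) :
    ((ds.flatMap f).countP p) = ((ds.map (fun d => (f d).countP p)).sum) := by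
  induction ds with
  | nil => simp
  | cons d t ih => simp [List.flatMap_cons, List.countP_append, ih]

-- a sum of Nat-valued casts is the cast of the Nat sum
lemma pvSumCast (l : List Nat) (g : Nat → Nat) :
    (l.map (fun x => ((g x : Nat) : Int))).sum = (((l.map g).sum : Nat) : Int) := by
  induction l with
  | nil => rfl
  | cons a t ih => simp [ih]

-- a sum over List.range is the Finset.range sum
lemma pvSumRange (f : Nat → Nat) (n : Nat) :
    ((List.range n).map f).sum = ∑ x ∈ Finset.range n, f x := by
  exact Nat.add_zero _

-- grouping: a sum over the digit sequence is a histogram-weighted sum over 0..9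
lemma pvGroup (ds : List Nat) (f : Nat → Nat) (hds : ∀ d ∈ ds, d < 10) :
    (ds.map f).sum = ∑ x ∈ Finset.range 10, ds.count x * f x := by
  induction ds with
  | nil => simp
  | cons d t ih =>
    have hd : d < 10 := hds d (by simp)
    rw [List.map_cons, List.sum_cons, ih (fun d' hd' => hds d' (by simp [hd']))]
    have hpt : ∀ x, (d :: t).count x * f x = t.count x * f x + (if x = d then f x else 0) := by
      intro x
      by_cases hxd : x = d
      · subst hxd; rw [List.count_cons_self]; simp; ring
      · simp [hxd, Ne.symm hxd]
    simp only [hpt, Finset.sum_add_distrib]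
    rw [Finset.sum_ite_eq' (Finset.range 10) d f]
    simp [Finset.mem_range.mpr hd]
    ring

-- ===== VERDICT (by name: the statement is the Claim_ definition above) =====
theorem countOddLetters_spec : Claim_equal_countOddLetters := by
  intro n _
  unfold Spec_countOddLetters
  set m := n.toNat with hm
  set ds := pvDigits m with hds
  set L := pvLetters m with hL
  have hdlt : ∀ d ∈ ds, d < 10 := pvDigits_lt m
  have hLchars := pvLetters_chars m
  set cN : Nat → Nat := fun i => L.countP (fun c => decide (c.toNat - 97 = i)) with hcN
  -- A's side: number of indices i < 26 whose letter count is odd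
  have hA : countOddLetters n
      = (((List.range 26).countP (fun i => decide (cN i % 2 = 1)) : Nat) : Int) := by
    rw [countOddLetters, ← hm, pvLoopA_eq]
    have h0 : (0 : Int) = ((0 : Nat) : Int) := rfl
    rw [h0, pvFold_natCast]
    have hlt : L.foldl pvXor 0 < 2 ^ 26 := pvFold_lt L hLchars 0 (by norm_num)
    rw [pvBitCount_eq_countP 26 _ hlt]
    congr 1
    refine List.countP_congr ?_
    intro i _
    rw [pvFold_testBit]
    simp [Nat.zero_testBit, hcN]
  -- the histogram B's phase 1 computes
  have hcnt : ∀ x < 10,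
      (pvCntLoop m (List.replicate 10 0)).getD x 0 = (ds.count x : Int) := by
    intro x hx
    rw [pvCntLoop_eq, ← hds, pvCnt_getD ds hdlt _ (by simp) x hx,
      List.getD_replicate _ hx]
    simp
  -- B's per-letter total is the letter's count in L
  have htot : ∀ i < 26, (List.range 10).foldl
      (fun s x => s + (pvCntLoop m (List.replicate 10 0)).getD x 0
        * (PySem.Str.count (pvSPELL.getD x "") (String.ofList [Char.ofNat (97 + i)]) : Int)) 0
      = ((cN i : Nat) : Int) := by
    intro i hi26
    rw [PySem.List.foldl_add]
    have hmap : (List.range 10).map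
        (fun x => (pvCntLoop m (List.replicate 10 0)).getD x 0
          * (PySem.Str.count (pvSPELL.getD x "") (String.ofList [Char.ofNat (97 + i)]) : Int))
        = (List.range 10).map (fun x =>
            (((ds.count x * ((pvSpell (Int.ofNat x)).countP
              (fun c => decide (c.toNat - 97 = i))) : Nat)) : Int)) := by
      refine List.map_congr_left ?_
      intro x hx
      have hx10 : x < 10 := List.mem_range.mp hx
      rw [hcnt x hx10, pvCoeff_eq x hx10 i hi26]
      push_cast
      ring
    rw [hmap, pvSumCast, pvSumRange, zero_add]
    have hcount : cN i = ∑ x ∈ Finset.range 10,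
        ds.count x * (pvSpell (Int.ofNat x)).countP (fun c => decide (c.toNat - 97 = i)) := by
      show (pvLetters m).countP (fun c => decide (c.toNat - 97 = i)) = _
      rw [pvLetters, ← hds, pvCountP_flatMap,
        pvGroup ds (fun d => (pvSpell (Int.ofNat d)).countP (fun c => decide (c.toNat - 97 = i))) hdlt]
    rw [hcount]
  -- assemble B
  have hB : countOddLetters_alt n
      = (List.range 26).foldl (fun ans i => ans + ((cN i % 2 : Nat) : Int)) 0 := by
    rw [countOddLetters_alt]
    simp only [← hm]
    refine PySem.List.foldl_congr_mem _ _ _ _ ?_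
    intro ans i hi
    have hi26 : i < 26 := List.mem_range.mp hi
    simp only [htot i hi26]
    congr 1
    exact_mod_cast PySem.Int.mod_natCast (cN i) 2
  rw [hA, hB, PySem.List.foldl_add, pvSumCast]
  have : (List.range 26).map (fun i => cN i % 2)
      = (List.range 26).map (fun i => if decide (cN i % 2 = 1) then 1 else 0) := by
    refine List.map_congr_left ?_
    intro i _
    by_cases h : cN i % 2 = 1
    · simp [h]
    · simp [h]; omega
  rw [this, PySem.List.sum_map_ite_one_zero_nat]
  simp
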